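-- pv_equiv track=rewrite | github.com/robertoallende/coderipple | coderipple/src/coderipple/building_inspector_agent.py | _identify_system_changes
-- ===== SOURCE A (Python) =====
-- from typing import Dict, Any, List, Optional
--
-- def _identify_system_changes(change_type: str, affected_files: List[str], commit_messages: List[str]) -> Dict[str, Any]:
--     """Identify which changes affect the current system"""
--
--     system_indicators = {
--         'core_functionality': ['src/', 'lib/', 'core/', 'main.py', 'app.py', '__init__.py'],
--         'architecture_changes': ['migrations/', 'models/', 'schema', 'database/', 'db/'],
--         'api_interfaces': ['api/', 'routes/', 'endpoints/', 'controllers/', 'handlers/'],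
--         'configuration': ['config/', 'settings', '.env', 'dockerfile', 'docker-compose'],
--         'dependencies': ['requirements.txt', 'package.json', 'Cargo.toml', 'pom.xml', 'setup.py'],
--         'infrastructure': ['terraform/', 'cloudformation/', '.github/', 'deploy/', 'k8s/']
--     }
--
--     identified_changes = {}
--
--     for category, indicators in system_indicators.items():
--         matches = []
--
--         # Check files
--         for file in affected_files:
--             if any(indicator in file.lower() for indicator in indicators):
--                 matches.append(f"File: {file}")
--
--         # Check commit messages
--         for msg in commit_messages:
--             if any(indicator in msg.lower() for indicator in indicators):
--                 matches.append(f"Commit: {msg[:50]}...")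
--
--         if matches:
--             identified_changes[category] = matches
--
--     return identified_changes
-- ===== SOURCE B (Python) =====
-- def _identify_system_changes(change_type, affected_files, commit_messages):
--     """Identify which changes affect the current system (single pass per input list,
--     lowercasing each string once, with six category accumulators)."""
--     inds_core = ['src/', 'lib/', 'core/', 'main.py', 'app.py', '__init__.py']
--     inds_arch = ['migrations/', 'models/', 'schema', 'database/', 'db/']
--     inds_api = ['api/', 'routes/', 'endpoints/', 'controllers/', 'handlers/']
--     inds_conf = ['config/', 'settings', '.env', 'dockerfile', 'docker-compose']
--     inds_deps = ['requirements.txt', 'package.json', 'Cargo.toml', 'pom.xml', 'setup.py']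
--     inds_infra = ['terraform/', 'cloudformation/', '.github/', 'deploy/', 'k8s/']
--
--     b_core, b_arch, b_api, b_conf, b_deps, b_infra = [], [], [], [], [], []
--
--     for f in affected_files:
--         fl = f.lower()
--         tag = f"File: {f}"
--         if any(i in fl for i in inds_core): b_core.append(tag)
--         if any(i in fl for i in inds_arch): b_arch.append(tag)
--         if any(i in fl for i in inds_api): b_api.append(tag)
--         if any(i in fl for i in inds_conf): b_conf.append(tag)
--         if any(i in fl for i in inds_deps): b_deps.append(tag)
--         if any(i in fl for i in inds_infra): b_infra.append(tag)
--
--     for m in commit_messages: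
--         ml = m.lower()
--         tag = f"Commit: {m[:50]}..."
--         if any(i in ml for i in inds_core): b_core.append(tag)
--         if any(i in ml for i in inds_arch): b_arch.append(tag)
--         if any(i in ml for i in inds_api): b_api.append(tag)
--         if any(i in ml for i in inds_conf): b_conf.append(tag)
--         if any(i in ml for i in inds_deps): b_deps.append(tag)
--         if any(i in ml for i in inds_infra): b_infra.append(tag)
--
--     result = {}
--     if b_core: result['core_functionality'] = b_core
--     if b_arch: result['architecture_changes'] = b_arch
--     if b_api: result['api_interfaces'] = b_api
--     if b_conf: result['configuration'] = b_conf
--     if b_deps: result['dependencies'] = b_deps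
--     if b_infra: result['infrastructure'] = b_infra
--     return result
-- ===== Notes on version B (the rewrite author's own statement) =====
-- stated objective: alternative
-- what changed: A loops over the six categories and rescans affected_files and commit_messages for each (lowercasing every string six times); B makes a single pass over each input list, lowercases each string once, dispatches matches into six category accumulator lists, and assembles the result dict afterwards in the declared category order.
import Mathlib
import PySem

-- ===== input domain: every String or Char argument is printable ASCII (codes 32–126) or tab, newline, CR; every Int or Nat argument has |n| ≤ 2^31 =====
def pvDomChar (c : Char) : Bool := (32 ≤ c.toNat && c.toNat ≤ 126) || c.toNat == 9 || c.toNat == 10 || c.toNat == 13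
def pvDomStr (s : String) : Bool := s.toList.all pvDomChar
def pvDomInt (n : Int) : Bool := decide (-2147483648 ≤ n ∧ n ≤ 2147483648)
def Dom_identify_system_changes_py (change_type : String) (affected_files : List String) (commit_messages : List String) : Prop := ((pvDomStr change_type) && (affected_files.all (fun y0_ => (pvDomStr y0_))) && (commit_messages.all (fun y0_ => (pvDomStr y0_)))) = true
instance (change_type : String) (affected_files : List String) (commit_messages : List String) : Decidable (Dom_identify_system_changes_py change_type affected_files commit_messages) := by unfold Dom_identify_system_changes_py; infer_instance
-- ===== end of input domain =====

-- B replaces A's six passes over each input list (category-outer loops) by one pass per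
-- input list with six accumulator lists, lowercasing each string once (objective: alternative decomposition).
-- ===== PORT A =====
def pvSysIndicators : List (String × List String) :=
  [("core_functionality", ["src/", "lib/", "core/", "main.py", "app.py", "__init__.py"]),
   ("architecture_changes", ["migrations/", "models/", "schema", "database/", "db/"]),
   ("api_interfaces", ["api/", "routes/", "endpoints/", "controllers/", "handlers/"]),
   ("configuration", ["config/", "settings", ".env", "dockerfile", "docker-compose"]),
   ("dependencies", ["requirements.txt", "package.json", "Cargo.toml", "pom.xml", "setup.py"]),
   ("infrastructure", ["terraform/", "cloudformation/", ".github/", "deploy/", "k8s/"])]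

def identify_system_changes_py (change_type : String) (affected_files : List String) (commit_messages : List String) : List (String × List String) :=
  pvSysIndicators.foldl (fun identified_changes ci =>
    -- Check files
    let matched := affected_files.foldl (fun ms file =>
      if ci.2.any (fun ind => PySem.Str.isIn ind (PySem.Str.lower file)) then
        ms ++ ["File: " ++ file] else ms) []
    -- Check commit messages
    let matched := commit_messages.foldl (fun ms msg =>
      if ci.2.any (fun ind => PySem.Str.isIn ind (PySem.Str.lower msg)) then
        ms ++ ["Commit: " ++ PySem.Str.slice msg none (some 50) ++ "..."] else ms) matched
    if matched ≠ [] then identified_changes ++ [(ci.1, matched)] else identified_changes) []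

-- ===== PORT B =====
def pvIndsCore : List String := ["src/", "lib/", "core/", "main.py", "app.py", "__init__.py"]
def pvIndsArch : List String := ["migrations/", "models/", "schema", "database/", "db/"]
def pvIndsApi : List String := ["api/", "routes/", "endpoints/", "controllers/", "handlers/"]
def pvIndsConf : List String := ["config/", "settings", ".env", "dockerfile", "docker-compose"]
def pvIndsDeps : List String := ["requirements.txt", "package.json", "Cargo.toml", "pom.xml", "setup.py"]
def pvIndsInfra : List String := ["terraform/", "cloudformation/", ".github/", "deploy/", "k8s/"]

structure PvBuckets where
  core : List String
  arch : List String
  api : List String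
  conf : List String
  deps : List String
  infra : List String
deriving Repr, DecidableEq

def pvHit (inds : List String) (lowered : String) : Bool :=
  inds.any (fun i => PySem.Str.isIn i lowered)

def pvStepFile (st : PvBuckets) (f : String) : PvBuckets :=
  let fl := PySem.Str.lower f
  let tag := "File: " ++ f
  { core := if pvHit pvIndsCore fl then st.core ++ [tag] else st.core
    arch := if pvHit pvIndsArch fl then st.arch ++ [tag] else st.arch
    api := if pvHit pvIndsApi fl then st.api ++ [tag] else st.api
    conf := if pvHit pvIndsConf fl then st.conf ++ [tag] else st.conf
    deps := if pvHit pvIndsDeps fl then st.deps ++ [tag] else st.deps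
    infra := if pvHit pvIndsInfra fl then st.infra ++ [tag] else st.infra }

def pvStepMsg (st : PvBuckets) (m : String) : PvBuckets :=
  let ml := PySem.Str.lower m
  let tag := "Commit: " ++ PySem.Str.slice m none (some 50) ++ "..."
  { core := if pvHit pvIndsCore ml then st.core ++ [tag] else st.core
    arch := if pvHit pvIndsArch ml then st.arch ++ [tag] else st.arch
    api := if pvHit pvIndsApi ml then st.api ++ [tag] else st.api
    conf := if pvHit pvIndsConf ml then st.conf ++ [tag] else st.conf
    deps := if pvHit pvIndsDeps ml then st.deps ++ [tag] else st.deps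
    infra := if pvHit pvIndsInfra ml then st.infra ++ [tag] else st.infra }

def identify_system_changes_py_alt (change_type : String) (affected_files : List String) (commit_messages : List String) : List (String × List String) :=
  let st := commit_messages.foldl pvStepMsg (affected_files.foldl pvStepFile ⟨[], [], [], [], [], []⟩)
  let result : List (String × List String) := []
  let result := if st.core ≠ [] then result ++ [("core_functionality", st.core)] else result
  let result := if st.arch ≠ [] then result ++ [("architecture_changes", st.arch)] else result
  let result := if st.api ≠ [] then result ++ [("api_interfaces", st.api)] else result
  let result := if st.conf ≠ [] then result ++ [("configuration", st.conf)] else result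
  let result := if st.deps ≠ [] then result ++ [("dependencies", st.deps)] else result
  let result := if st.infra ≠ [] then result ++ [("infrastructure", st.infra)] else result
  result

-- ===== PRECONDITION & SPEC =====
def Spec_identify_system_changes_py (change_type : String) (affected_files : List String) (commit_messages : List String) (out : List (String × List String)) : Prop := out = identify_system_changes_py_alt change_type affected_files commit_messages
instance (change_type : String) (affected_files : List String) (commit_messages : List String) (out : List (String × List String)) : Decidable (Spec_identify_system_changes_py change_type affected_files commit_messages out) := by unfold Spec_identify_system_changes_py; infer_instance

-- ===== CLAIM (what is proved, stated in full; the proofs are below) =====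
def Claim_equal_identify_system_changes_py : Prop := ∀ (change_type : String) (affected_files : List String) (commit_messages : List String), Dom_identify_system_changes_py change_type affected_files commit_messages → Spec_identify_system_changes_py change_type affected_files commit_messages (identify_system_changes_py change_type affected_files commit_messages)

-- ===== LEMMAS AND PROOFS =====
-- Each bucket of B's combined fold equals the corresponding per-category fold of A
-- (List.foldl_hom with the field projection, applied to the file fold and the message fold).
theorem pvBucket_core (files msgs : List String) (init : PvBuckets) :
    (msgs.foldl pvStepMsg (files.foldl pvStepFile init)).core =
      msgs.foldl (fun ms m => if pvHit pvIndsCore (PySem.Str.lower m) then ms ++ ["Commit: " ++ PySem.Str.slice m none (some 50) ++ "..."] else ms)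
        (files.foldl (fun ms f => if pvHit pvIndsCore (PySem.Str.lower f) then ms ++ ["File: " ++ f] else ms) init.core) := by
  rw [List.foldl_hom (g₁ := pvStepFile) (g₂ := fun ms f => if pvHit pvIndsCore (PySem.Str.lower f) then ms ++ ["File: " ++ f] else ms) PvBuckets.core (fun st y => rfl),
      List.foldl_hom (g₁ := pvStepMsg) (g₂ := fun ms m => if pvHit pvIndsCore (PySem.Str.lower m) then ms ++ ["Commit: " ++ PySem.Str.slice m none (some 50) ++ "..."] else ms) PvBuckets.core (fun st y => rfl)]

theorem pvBucket_arch (files msgs : List String) (init : PvBuckets) :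
    (msgs.foldl pvStepMsg (files.foldl pvStepFile init)).arch =
      msgs.foldl (fun ms m => if pvHit pvIndsArch (PySem.Str.lower m) then ms ++ ["Commit: " ++ PySem.Str.slice m none (some 50) ++ "..."] else ms)
        (files.foldl (fun ms f => if pvHit pvIndsArch (PySem.Str.lower f) then ms ++ ["File: " ++ f] else ms) init.arch) := by
  rw [List.foldl_hom (g₁ := pvStepFile) (g₂ := fun ms f => if pvHit pvIndsArch (PySem.Str.lower f) then ms ++ ["File: " ++ f] else ms) PvBuckets.arch (fun st y => rfl),
      List.foldl_hom (g₁ := pvStepMsg) (g₂ := fun ms m => if pvHit pvIndsArch (PySem.Str.lower m) then ms ++ ["Commit: " ++ PySem.Str.slice m none (some 50) ++ "..."] else ms) PvBuckets.arch (fun st y => rfl)]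

theorem pvBucket_api (files msgs : List String) (init : PvBuckets) :
    (msgs.foldl pvStepMsg (files.foldl pvStepFile init)).api =
      msgs.foldl (fun ms m => if pvHit pvIndsApi (PySem.Str.lower m) then ms ++ ["Commit: " ++ PySem.Str.slice m none (some 50) ++ "..."] else ms)
        (files.foldl (fun ms f => if pvHit pvIndsApi (PySem.Str.lower f) then ms ++ ["File: " ++ f] else ms) init.api) := by
  rw [List.foldl_hom (g₁ := pvStepFile) (g₂ := fun ms f => if pvHit pvIndsApi (PySem.Str.lower f) then ms ++ ["File: " ++ f] else ms) PvBuckets.api (fun st y => rfl),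
      List.foldl_hom (g₁ := pvStepMsg) (g₂ := fun ms m => if pvHit pvIndsApi (PySem.Str.lower m) then ms ++ ["Commit: " ++ PySem.Str.slice m none (some 50) ++ "..."] else ms) PvBuckets.api (fun st y => rfl)]

theorem pvBucket_conf (files msgs : List String) (init : PvBuckets) :
    (msgs.foldl pvStepMsg (files.foldl pvStepFile init)).conf =
      msgs.foldl (fun ms m => if pvHit pvIndsConf (PySem.Str.lower m) then ms ++ ["Commit: " ++ PySem.Str.slice m none (some 50) ++ "..."] else ms)
        (files.foldl (fun ms f => if pvHit pvIndsConf (PySem.Str.lower f) then ms ++ ["File: " ++ f] else ms) init.conf) := by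
  rw [List.foldl_hom (g₁ := pvStepFile) (g₂ := fun ms f => if pvHit pvIndsConf (PySem.Str.lower f) then ms ++ ["File: " ++ f] else ms) PvBuckets.conf (fun st y => rfl),
      List.foldl_hom (g₁ := pvStepMsg) (g₂ := fun ms m => if pvHit pvIndsConf (PySem.Str.lower m) then ms ++ ["Commit: " ++ PySem.Str.slice m none (some 50) ++ "..."] else ms) PvBuckets.conf (fun st y => rfl)]

theorem pvBucket_deps (files msgs : List String) (init : PvBuckets) :
    (msgs.foldl pvStepMsg (files.foldl pvStepFile init)).deps =
      msgs.foldl (fun ms m => if pvHit pvIndsDeps (PySem.Str.lower m) then ms ++ ["Commit: " ++ PySem.Str.slice m none (some 50) ++ "..."] else ms)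
        (files.foldl (fun ms f => if pvHit pvIndsDeps (PySem.Str.lower f) then ms ++ ["File: " ++ f] else ms) init.deps) := by
  rw [List.foldl_hom (g₁ := pvStepFile) (g₂ := fun ms f => if pvHit pvIndsDeps (PySem.Str.lower f) then ms ++ ["File: " ++ f] else ms) PvBuckets.deps (fun st y => rfl),
      List.foldl_hom (g₁ := pvStepMsg) (g₂ := fun ms m => if pvHit pvIndsDeps (PySem.Str.lower m) then ms ++ ["Commit: " ++ PySem.Str.slice m none (some 50) ++ "..."] else ms) PvBuckets.deps (fun st y => rfl)]

theorem pvBucket_infra (files msgs : List String) (init : PvBuckets) :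
    (msgs.foldl pvStepMsg (files.foldl pvStepFile init)).infra =
      msgs.foldl (fun ms m => if pvHit pvIndsInfra (PySem.Str.lower m) then ms ++ ["Commit: " ++ PySem.Str.slice m none (some 50) ++ "..."] else ms)
        (files.foldl (fun ms f => if pvHit pvIndsInfra (PySem.Str.lower f) then ms ++ ["File: " ++ f] else ms) init.infra) := by
  rw [List.foldl_hom (g₁ := pvStepFile) (g₂ := fun ms f => if pvHit pvIndsInfra (PySem.Str.lower f) then ms ++ ["File: " ++ f] else ms) PvBuckets.infra (fun st y => rfl),
      List.foldl_hom (g₁ := pvStepMsg) (g₂ := fun ms m => if pvHit pvIndsInfra (PySem.Str.lower m) then ms ++ ["Commit: " ++ PySem.Str.slice m none (some 50) ++ "..."] else ms) PvBuckets.infra (fun st y => rfl)]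

-- ===== VERDICT (by name: the statement is the Claim_ definition above) =====
theorem identify_system_changes_py_spec : Claim_equal_identify_system_changes_py := by
  intro ct files msgs _
  show identify_system_changes_py ct files msgs = identify_system_changes_py_alt ct files msgs
  simp only [identify_system_changes_py_alt,
    pvBucket_core files msgs, pvBucket_arch files msgs, pvBucket_api files msgs,
    pvBucket_conf files msgs, pvBucket_deps files msgs, pvBucket_infra files msgs]
  simp only [identify_system_changes_py, pvSysIndicators, List.foldl_cons, List.foldl_nil, pvHit,
    pvIndsCore, pvIndsArch, pvIndsApi, pvIndsConf, pvIndsDeps, pvIndsInfra]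
  rfl
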